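-- pv_equiv track=rewrite | github.com/ldg1036/AI_TF_CODEREVIEW | _remove_session_methods.py | find_method_ranges
-- ===== SOURCE A (Python) =====
-- def find_method_ranges(lines, method_names):
--     """Find (start, end) line ranges for each method."""
--     ranges = []
--     i = 0
--     while i < len(lines):
--         line = lines[i]
--         stripped = line.strip()
--         # Match method definitions (def, @staticmethod, @classmethod decorators)
--         for name in method_names:
--             if f"def {name}(" in stripped or f"def {name} (" in stripped:
--                 # Look back for decorators
--                 start = i
--                 while start > 0 and lines[start - 1].strip().startswith("@"):
--                     start -= 1
--                 # Find method end: next line at same or lower indentation that isn't blank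
--                 method_indent = len(line) - len(line.lstrip())
--                 end = i + 1
--                 while end < len(lines):
--                     next_line = lines[end]
--                     next_stripped = next_line.strip()
--                     if next_stripped == "":
--                         end += 1
--                         continue
--                     next_indent = len(next_line) - len(next_line.lstrip())
--                     if next_indent <= method_indent and not next_stripped.startswith("#"):
--                         break
--                     end += 1
--                 # Trim trailing blank lines
--                 while end > start and lines[end - 1].strip() == "":
--                     end -= 1
--                 ranges.append((name, start, end))
--                 break
--         i += 1
--     return ranges
-- ===== SOURCE B (Python) =====
-- def find_method_ranges(lines, method_names):
--     """Find (start, end) line ranges for each method.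
--
--     Table-driven: precompute once (a) a DP table mapping each line to the
--     start of its decorator run, (b) a table of the last non-blank line at
--     or before each index, and (c) the sorted list of candidate boundary
--     lines (non-blank, non-comment) with their indents.  Each match is then
--     answered from the tables: start = dstart[i], the boundary j is the
--     first candidate after i with indent <= the def's indent, and the end
--     is lastnb[j-1] + 1 (which is exactly the trailing-blank-trimmed end).
--     """
--     n = len(lines)
--     stripped = [ln.strip() for ln in lines]
--     indents = [len(ln) - len(ln.lstrip()) for ln in lines]
--     # (a) decorator-run start, forward DP instead of per-match backward walk
--     dstart = [0] * n
--     for i in range(n):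
--         dstart[i] = dstart[i - 1] if i > 0 and stripped[i - 1].startswith("@") else i
--     # (b) last non-blank line index at or before each line (-1 if none)
--     lastnb = [0] * n
--     prev = -1
--     for i in range(n):
--         if stripped[i] != "":
--             prev = i
--         lastnb[i] = prev
--     # (c) candidate boundary lines
--     bounds = [(j, indents[j]) for j in range(n)
--               if stripped[j] != "" and not stripped[j].startswith("#")]
--     ranges = []
--     for i in range(n):
--         name = next((nm for nm in method_names
--                      if f"def {nm}(" in stripped[i] or f"def {nm} (" in stripped[i]),
--                     None)
--         if name is None:
--             continue
--         j = next((b for b, ind in bounds if i < b and ind <= indents[i]), n)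
--         ranges.append((name, dstart[i], lastnb[j - 1] + 1))
--     return ranges
-- ===== Notes on version B (the rewrite author's own statement) =====
-- stated objective: alternative
-- what changed: B precomputes three tables in single passes (a forward DP giving each line's decorator-run start, a running last-non-blank-line table, and a filtered list of candidate boundary lines with indents) and answers every match by table lookup -- no per-match backward decorator walk, no per-match forward blank/comment scan, no trailing-blank trim loop.
import Mathlib
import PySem

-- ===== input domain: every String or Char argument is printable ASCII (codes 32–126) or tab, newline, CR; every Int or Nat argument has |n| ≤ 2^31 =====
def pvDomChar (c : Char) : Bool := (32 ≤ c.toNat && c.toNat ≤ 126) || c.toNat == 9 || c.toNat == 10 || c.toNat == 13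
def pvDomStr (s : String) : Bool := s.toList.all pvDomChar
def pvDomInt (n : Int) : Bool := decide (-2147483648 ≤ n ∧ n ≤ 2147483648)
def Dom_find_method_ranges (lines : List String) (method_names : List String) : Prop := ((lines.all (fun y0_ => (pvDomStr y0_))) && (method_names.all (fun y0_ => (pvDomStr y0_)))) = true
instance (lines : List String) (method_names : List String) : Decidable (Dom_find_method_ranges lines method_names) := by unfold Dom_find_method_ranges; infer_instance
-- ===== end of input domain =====

-- B is table-driven: three single-pass tables (decorator-run starts by forward DP, last
-- non-blank line so far, and the list of candidate boundary lines) replace A's per-match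
-- backward decorator walk, forward end scan and trailing-blank trim loop. Same cost class.

-- shared primitive (both Pythons test a line against a name the same way)
def pvMatch (stripped : String) (name : String) : Bool :=
  PySem.Str.isIn ("def " ++ name ++ "(") stripped || PySem.Str.isIn ("def " ++ name ++ " (") stripped

def pvIndent (s : String) : Int := PySem.Str.len s - PySem.Str.len (PySem.Str.lstrip s)

-- ===== PORT A =====
-- A's backward decorator look-back while-loop
def pvDecStart (lines : List String) : Nat → Nat
  | 0 => 0
  | (s+1) => if PySem.Str.startswith (PySem.Str.strip (lines.getD s "")) "@" = true
             then pvDecStart lines s else s + 1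

-- A's forward end-scan: skip blanks, stop at first non-blank line at ≤ indent that is not a comment
def pvEndScanA (lines : List String) (mi : Int) (e : Nat) : Nat :=
  if _h : e < lines.length then
    let ns := PySem.Str.strip (lines.getD e "")
    if ns = "" then pvEndScanA lines mi (e+1)
    else if pvIndent (lines.getD e "") ≤ mi ∧ ¬ (PySem.Str.startswith ns "#" = true) then e
    else pvEndScanA lines mi (e+1)
  else e
termination_by lines.length - e

-- A's trailing-blank trim
def pvTrimA (lines : List String) (start : Nat) (e : Nat) : Nat :=
  if _h : start < e ∧ PySem.Str.strip (lines.getD (e-1) "") = "" then pvTrimA lines start (e-1)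
  else e
termination_by e
decreasing_by omega

-- A's main while-loop over the line index
def pvLoopA (lines names : List String) (i : Nat) (acc : List (String × Int × Int)) :
    List (String × Int × Int) :=
  if _h : i < lines.length then
    let line := lines.getD i ""
    let stripped := PySem.Str.strip line
    let acc' :=
      match names.find? (fun nm => pvMatch stripped nm) with
      | some nm =>
          let start := pvDecStart lines i
          let e := pvTrimA lines start (pvEndScanA lines (pvIndent line) (i+1))
          acc ++ [(nm, (start : Int), (e : Int))]
      | none => acc
    pvLoopA lines names (i+1) acc'
  else acc
termination_by lines.length - i

def find_method_ranges (lines : List String) (method_names : List String) :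
    List (String × Int × Int) :=
  pvLoopA lines method_names 0 []

-- ===== PORT B =====
-- Source B table (a): decorator-run start for every line, built by a forward DP loop
def pvBuildDStart (stripped : List String) : List Nat :=
  (List.range stripped.length).foldl
    (fun acc i =>
      acc ++ [if 0 < i ∧ PySem.Str.startswith (stripped.getD (i-1) "") "@" = true
              then acc.getD (i-1) 0 else i]) []

-- Source B table (b): last non-blank line index at or before each line (-1 if none)
def pvBuildLastNb (stripped : List String) : List Int :=
  ((List.range stripped.length).foldl
    (fun (st : List Int × Int) i =>
      let prev := if stripped.getD i "" ≠ "" then (i : Int) else st.2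
      (st.1 ++ [prev], prev)) ([], -1)).1

def find_method_ranges_alt (lines : List String) (method_names : List String) :
    List (String × Int × Int) :=
  let n := lines.length
  let stripped := lines.map PySem.Str.strip
  let indents := lines.map pvIndent
  let dstart := pvBuildDStart stripped
  let lastnb := pvBuildLastNb stripped
  -- Source B table (c): candidate boundary lines (non-blank, non-comment) with their indents
  let bounds := (List.range n).filterMap (fun j =>
    if stripped.getD j "" ≠ "" ∧ ¬ (PySem.Str.startswith (stripped.getD j "") "#" = true)
    then some (j, indents.getD j (0 : Int)) else none)
  (List.range n).foldl (fun acc i =>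
    match method_names.find? (fun nm => pvMatch (stripped.getD i "") nm) with
    | none => acc
    | some nm =>
        let j := ((bounds.find? (fun b =>
          decide (i < b.1) && decide (b.2 ≤ indents.getD i 0))).map Prod.fst).getD n
        acc ++ [(nm, (dstart.getD i 0 : Int), lastnb.getD (j-1) 0 + 1)]) []

-- ===== PRECONDITION & SPEC =====
def Spec_find_method_ranges (lines : List String) (method_names : List String) (out : List (String × Int × Int)) : Prop := out = find_method_ranges_alt lines method_names
instance (lines : List String) (method_names : List String) (out : List (String × Int × Int)) : Decidable (Spec_find_method_ranges lines method_names out) := by unfold Spec_find_method_ranges; infer_instance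

-- ===== CLAIM (what is proved, stated in full; the proofs are below) =====
def Claim_equal_find_method_ranges : Prop := ∀ (lines : List String) (method_names : List String), Dom_find_method_ranges lines method_names → Spec_find_method_ranges lines method_names (find_method_ranges lines method_names)

-- ===== LEMMAS AND PROOFS =====

-- bridges: B's precomputed stripped/indent tables, read anywhere, agree with stripping on demand
@[simp] lemma sGetD (lines : List String) (s : Nat) :
    (lines.map PySem.Str.strip).getD s "" = PySem.Str.strip (lines.getD s "") := by
  simp only [List.getD, List.getElem?_map]
  cases lines[s]? with
  | none => simp; decide
  | some v => simp

@[simp] lemma iGetD (lines : List String) (s : Nat) :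
    (lines.map pvIndent).getD s 0 = pvIndent (lines.getD s "") := by
  simp only [List.getD, List.getElem?_map]
  cases lines[s]? with
  | none => simp; decide
  | some v => simp

-- a matched line is non-blank after strip
lemma strip_ne_of_match {stripped nm : String} (h : pvMatch stripped nm = true) :
    stripped ≠ "" := by
  intro heq; subst heq
  unfold pvMatch at h
  rcases Bool.or_eq_true_iff.mp h with h' | h' <;>
  · rw [PySem.Str.isIn_iff_infix] at h'
    simp [String.toList_append] at h'

lemma decStart_le (lines : List String) : ∀ i, pvDecStart lines i ≤ i := by
  intro i
  induction i with
  | zero => simp [pvDecStart]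
  | succ s ih => unfold pvDecStart; split <;> omega

-- table (a) is the per-line decorator-run start
lemma build_dstart (lines : List String) :
    ∀ k, (List.range k).foldl
      (fun acc i =>
        acc ++ [if 0 < i ∧ PySem.Str.startswith ((lines.map PySem.Str.strip).getD (i-1) "") "@" = true
                then acc.getD (i-1) 0 else i]) []
      = (List.range k).map (pvDecStart lines) := by
  intro k
  induction k with
  | zero => simp
  | succ k ih =>
    rw [List.range_succ, List.foldl_append, List.map_append, ih]
    simp only [List.foldl_cons, List.foldl_nil]
    congr 1
    cases k with
    | zero => simp [pvDecStart]
    | succ s =>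
      simp only [sGetD]
      simp [pvDecStart]

-- running last-non-blank value, as a recursive function
def lnF (lines : List String) : Nat → Int
  | 0 => if PySem.Str.strip (lines.getD 0 "") ≠ "" then 0 else -1
  | (s+1) => if PySem.Str.strip (lines.getD (s+1) "") ≠ "" then ((s : Int) + 1) else lnF lines s

def prevOf (lines : List String) : Nat → Int
  | 0 => -1
  | (s+1) => lnF lines s

-- table (b) is lnF
lemma build_lastnb (lines : List String) :
    ∀ k, (List.range k).foldl
      (fun (st : List Int × Int) i =>
        let prev := if (lines.map PySem.Str.strip).getD i "" ≠ "" then (i : Int) else st.2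
        (st.1 ++ [prev], prev)) ([], -1)
      = ((List.range k).map (lnF lines), prevOf lines k) := by
  intro k
  induction k with
  | zero => simp [prevOf]
  | succ k ih =>
    rw [List.range_succ, List.foldl_append, ih]
    simp only [List.foldl_cons, List.foldl_nil, List.map_append]
    have hp : (if (lines.map PySem.Str.strip).getD k "" ≠ "" then (k : Int) else prevOf lines k)
        = lnF lines k := by
      cases k with
      | zero => simp only [sGetD, prevOf]; rfl
      | succ s => simp only [sGetD, prevOf]; rfl
    rw [hp]
    simp [prevOf]

lemma lnF_self {lines : List String} {m : Nat} (h : PySem.Str.strip (lines.getD m "") ≠ "") :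
    lnF lines m = (m : Int) := by
  cases m with
  | zero => simp only [lnF]; rw [if_pos h]; simp
  | succ s => simp only [lnF]; rw [if_pos h]; push_cast; ring

-- A's trailing-blank trim computes table (b)'s value at the line before the boundary
lemma trim_eq (lines : List String) (start : Nat) :
    ∀ j i, PySem.Str.strip (lines.getD i "") ≠ "" → start ≤ i → i < j →
      (pvTrimA lines start j : Int) = lnF lines (j-1) + 1 := by
  intro j
  induction j with
  | zero => omega
  | succ m ih =>
    intro i hnb hsi him
    unfold pvTrimA
    by_cases hb : PySem.Str.strip (lines.getD m "") = ""
    · have hij : i < m := by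
        rcases Nat.lt_succ_iff_lt_or_eq.mp him with h | h
        · exact h
        · exact absurd (h ▸ hnb) (not_not_intro hb)
      rw [dif_pos ⟨by omega, by simpa using hb⟩]
      have := ih i hnb hsi hij
      simp only [Nat.add_sub_cancel]
      rw [this]
      cases m with
      | zero => omega
      | succ s =>
        have hstep : lnF lines (s+1) = lnF lines s := by
          simp only [lnF]; rw [if_neg (not_not_intro hb)]
        simp only [Nat.add_sub_cancel, hstep]
    · rw [dif_neg (by simp; intro _; simpa using hb)]
      simp only [Nat.add_sub_cancel]
      rw [lnF_self hb]
      push_cast; ring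

-- candidate-boundary generator (table (c) entry for line j)
def gB (lines : List String) (j : Nat) : Option (Nat × Int) :=
  if PySem.Str.strip (lines.getD j "") ≠ "" ∧
     ¬ (PySem.Str.startswith (PySem.Str.strip (lines.getD j "")) "#" = true)
  then some (j, pvIndent (lines.getD j "")) else none

-- A's forward end-scan = first table-(c) entry from e with indent ≤ mi (or n)
lemma scan_eq (lines : List String) (mi : Int) :
    ∀ fuel e, lines.length ≤ e + fuel → e ≤ lines.length →
      pvEndScanA lines mi e =
        ((((List.range' e (lines.length - e)).filterMap (gB lines)).find?
          (fun b => decide (b.2 ≤ mi))).map Prod.fst).getD lines.length := by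
  intro fuel
  induction fuel with
  | zero =>
    intro e hlen hle
    have he : e = lines.length := by omega
    unfold pvEndScanA
    rw [dif_neg (by omega)]
    simp [he]
  | succ f ih =>
    intro e hlen hle
    by_cases he : e < lines.length
    · have hr : List.range' e (lines.length - e) = e :: List.range' (e+1) (lines.length - (e+1)) := by
        have : lines.length - e = (lines.length - (e+1)) + 1 := by omega
        rw [this, List.range'_succ]
      unfold pvEndScanA
      rw [dif_pos he, hr]
      by_cases hb : PySem.Str.strip (lines.getD e "") = ""
      · rw [if_pos hb]
        have hg : gB lines e = none := by
          unfold gB; rw [if_neg (by intro h; exact h.1 hb)]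
        rw [List.filterMap_cons, hg]
        exact ih (e+1) (by omega) (by omega)
      · rw [if_neg hb]
        by_cases hc : PySem.Str.startswith (PySem.Str.strip (lines.getD e "")) "#" = true
        · have hg : gB lines e = none := by
            unfold gB; rw [if_neg (by intro h; exact h.2 hc)]
          rw [if_neg (by intro h; exact h.2 hc), List.filterMap_cons, hg]
          exact ih (e+1) (by omega) (by omega)
        · have hg : gB lines e = some (e, pvIndent (lines.getD e "")) := by
            unfold gB; rw [if_pos ⟨hb, hc⟩]
          rw [List.filterMap_cons, hg]
          by_cases hind : pvIndent (lines.getD e "") ≤ mi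
          · rw [if_pos ⟨hind, hc⟩]
            rw [List.find?_cons_of_pos (by simpa using hind)]
            rfl
          · rw [if_neg (by intro h; exact hind h.1)]
            rw [List.find?_cons_of_neg (by simpa using hind)]
            exact ih (e+1) (by omega) (by omega)
    · unfold pvEndScanA
      rw [dif_neg he]
      have he' : e = lines.length := by omega
      simp [he']

lemma find?_congr' {α : Type} (p q : α → Bool) :
    ∀ l : List α, (∀ x ∈ l, p x = q x) → l.find? p = l.find? q := by
  intro l
  induction l with
  | nil => intro _; rfl
  | cons a t ih =>
    intro h
    rw [List.find?_cons, List.find?_cons, h a (by simp)]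
    split
    · rfl
    · exact ih (fun x hx => h x (by simp [hx]))

-- B's search over the full boundary table = the search over its suffix after i
lemma find_split (lines : List String) (mi : Int) (i : Nat) (hi : i < lines.length) :
    ((List.range lines.length).filterMap (gB lines)).find?
        (fun b => decide (i < b.1) && decide (b.2 ≤ mi))
      = ((List.range' (i+1) (lines.length - (i+1))).filterMap (gB lines)).find?
        (fun b => decide (b.2 ≤ mi)) := by
  have hsplit : List.range lines.length
      = List.range' 0 (i+1) ++ List.range' (i+1) (lines.length - (i+1)) := by
    rw [List.range_eq_range']
    have h := @List.range'_append 0 (i+1) (lines.length - (i+1)) 1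
    simp only [Nat.one_mul, Nat.zero_add] at h
    have h2 : (i+1) + (lines.length - (i+1)) = lines.length := by omega
    rw [h2] at h
    exact h.symm
  rw [hsplit, List.filterMap_append, List.find?_append]
  have h1 : (((List.range' 0 (i+1)).filterMap (gB lines)).find?
      (fun b => decide (i < b.1) && decide (b.2 ≤ mi))) = none := by
    rw [List.find?_eq_none]
    intro b hb
    rcases List.mem_filterMap.mp hb with ⟨a, ha, hg⟩
    have hai : a < i + 1 := by
      rcases List.mem_range'.mp ha with ⟨t, ht, rfl⟩; omega
    have hba : b.1 = a := by
      unfold gB at hg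
      split at hg
      · cases hg; rfl
      · cases hg
    simp [hba, Nat.not_lt.mpr (Nat.lt_succ_iff.mp hai)]
  rw [h1, Option.none_or]
  apply find?_congr'
  intro b hb
  rcases List.mem_filterMap.mp hb with ⟨a, ha, hg⟩
  have hai : i + 1 ≤ a := by
    rcases List.mem_range'.mp ha with ⟨t, ht, rfl⟩; omega
  have hba : b.1 = a := by
    unfold gB at hg
    split at hg
    · cases hg; rfl
    · cases hg
  simp [hba]; omega

-- the found boundary lies in (i, n]
lemma found_bounds (lines : List String) (mi : Int) (i : Nat) :
    ∀ b, (((List.range' (i+1) (lines.length - (i+1))).filterMap (gB lines)).find?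
      (fun b => decide (b.2 ≤ mi))) = some b → i + 1 ≤ b.1 ∧ b.1 < lines.length := by
  intro b hfind
  have hb := List.mem_of_find?_eq_some hfind
  rcases List.mem_filterMap.mp hb with ⟨a, ha, hg⟩
  have hba : b.1 = a := by
    unfold gB at hg
    split at hg
    · cases hg; rfl
    · cases hg
  rcases List.mem_range'.mp ha with ⟨t, ht, rfl⟩
  constructor <;> omega

-- B's per-match end value equals A's scan-then-trim end value
lemma end_eq (lines : List String) (i : Nat) (hi : i < lines.length)
    (hnb : PySem.Str.strip (lines.getD i "") ≠ "") :
    (pvTrimA lines (pvDecStart lines i)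
        (pvEndScanA lines (pvIndent (lines.getD i "")) (i+1)) : Int)
      = (pvBuildLastNb (lines.map PySem.Str.strip)).getD
          (((((List.range lines.length).filterMap (gB lines)).find?
            (fun b => decide (i < b.1) && decide (b.2 ≤ pvIndent (lines.getD i "")))).map
              Prod.fst).getD lines.length - 1) 0 + 1 := by
  set mi := pvIndent (lines.getD i "") with hmi
  rw [find_split lines mi i hi]
  set o := ((List.range' (i+1) (lines.length - (i+1))).filterMap (gB lines)).find?
    (fun b => decide (b.2 ≤ mi)) with ho
  have hscan : pvEndScanA lines mi (i+1) = (o.map Prod.fst).getD lines.length := by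
    rw [scan_eq lines mi lines.length (i+1) (by omega) (by omega), ho]
  set j := (o.map Prod.fst).getD lines.length with hj
  have hij : i < j ∧ j ≤ lines.length := by
    cases hoc : o with
    | none => simp [hj, hoc]; omega
    | some b =>
      have := found_bounds lines mi i b (ho ▸ hoc)
      simp [hj, hoc]; omega
  have hjn : j - 1 < lines.length := by omega
  have hlastnb : (pvBuildLastNb (lines.map PySem.Str.strip)).getD (j-1) 0 = lnF lines (j-1) := by
    unfold pvBuildLastNb
    rw [List.length_map, build_lastnb lines lines.length]
    simp only
    rw [List.getD, List.getElem?_map, List.getElem?_range hjn]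
    rfl
  rw [hscan, hlastnb]
  exact trim_eq lines (pvDecStart lines i) j i hnb (decStart_le lines i) hij.1

-- step-by-step: A's interleaved loop equals B's fold over the remaining indices
lemma loop_eq (lines names : List String) :
    ∀ i acc, pvLoopA lines names i acc =
      (List.range' i (lines.length - i)).foldl (fun acc i =>
        match names.find? (fun nm => pvMatch ((lines.map PySem.Str.strip).getD i "") nm) with
        | none => acc
        | some nm =>
            let j := ((((List.range lines.length).filterMap (fun j =>
                if (lines.map PySem.Str.strip).getD j "" ≠ "" ∧
                   ¬ (PySem.Str.startswith ((lines.map PySem.Str.strip).getD j "") "#" = true)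
                then some (j, (lines.map pvIndent).getD j (0 : Int)) else none)).find? (fun b =>
              decide (i < b.1) && decide (b.2 ≤ (lines.map pvIndent).getD i 0))).map
                Prod.fst).getD lines.length
            acc ++ [(nm, ((pvBuildDStart (lines.map PySem.Str.strip)).getD i 0 : Int),
                     (pvBuildLastNb (lines.map PySem.Str.strip)).getD (j-1) 0 + 1)]) acc := by
  intro i acc
  have hgB : (fun j =>
      if (lines.map PySem.Str.strip).getD j "" ≠ "" ∧
         ¬ (PySem.Str.startswith ((lines.map PySem.Str.strip).getD j "") "#" = true)
      then some (j, (lines.map pvIndent).getD j (0 : Int)) else none) = gB lines := by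
    funext j; simp only [sGetD, iGetD, gB]
  fun_induction pvLoopA lines names i acc with
  | case1 i acc hi line stripped acc' ih =>
    have hr : List.range' i (lines.length - i)
        = i :: List.range' (i+1) (lines.length - (i+1)) := by
      have : lines.length - i = (lines.length - (i+1)) + 1 := by omega
      rw [this, List.range'_succ]
    rw [ih, hr, List.foldl_cons, hgB]
    congr 1
    have key : (match names.find? (fun nm => pvMatch (PySem.Str.strip (lines.getD i "")) nm) with
        | some nm => acc ++ [(nm, (pvDecStart lines i : Int),
            (pvTrimA lines (pvDecStart lines i)
              (pvEndScanA lines (pvIndent (lines.getD i "")) (i+1)) : Int))]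
        | none => acc)
      = (match names.find? (fun nm => pvMatch ((lines.map PySem.Str.strip).getD i "") nm) with
        | none => acc
        | some nm =>
          let j := ((((List.range lines.length).filterMap (gB lines)).find? (fun b =>
              decide (i < b.1) && decide (b.2 ≤ (lines.map pvIndent).getD i 0))).map
                Prod.fst).getD lines.length
          acc ++ [(nm, ((pvBuildDStart (lines.map PySem.Str.strip)).getD i 0 : Int),
                   (pvBuildLastNb (lines.map PySem.Str.strip)).getD (j-1) 0 + 1)]) := by
      rw [sGetD, iGetD]
      cases hfind : names.find? (fun nm => pvMatch (PySem.Str.strip (lines.getD i "")) nm) with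
      | none => rfl
      | some nm =>
        have hmatch : pvMatch (PySem.Str.strip (lines.getD i "")) nm = true :=
          List.find?_some hfind
        have hnb := strip_ne_of_match hmatch
        have hd : ((pvBuildDStart (lines.map PySem.Str.strip)).getD i 0) = pvDecStart lines i := by
          unfold pvBuildDStart
          rw [List.length_map, build_dstart lines lines.length]
          rw [List.getD, List.getElem?_map, List.getElem?_range hi]
          rfl
        have hend := end_eq lines i hi hnb
        simp only [hd]
        rw [← hend]
    exact key
  | case2 i acc hi =>
    have h0 : lines.length - i = 0 := by omega
    rw [h0]
    simp
-- ===== VERDICT (by name: the statement is the Claim_ definition above) =====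
theorem find_method_ranges_spec : Claim_equal_find_method_ranges := by
  intro lines names _
  show _ = _
  unfold find_method_ranges find_method_ranges_alt
  rw [loop_eq lines names 0 []]
  simp [List.range_eq_range']
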